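-- pv_equiv track=rewrite | github.com/arjandepooter/advent-of-code-2023 | aoc_2023/day02/solution.py | min_amount
-- ===== SOURCE A (Python) =====
-- def min_amount(samples):
--     red, green, blue = 0, 0, 0
--     for sample in samples:
--         for amount, color in sample:
--             if color == "red" and red < amount:
--                 red = amount
--             elif color == "green" and green < amount:
--                 green = amount
--             elif color == "blue" and blue < amount:
--                 blue = amount
--     return red, green, blue
-- ===== SOURCE B (Python) =====
-- def min_amount(samples):
--     flat = [pair for sample in samples for pair in sample]
--     def best(target):
--         return max([0] + [amount for amount, color in flat if color == target])
--     return best("red"), best("green"), best("blue")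
-- ===== Notes on version B (the rewrite author's own statement) =====
-- stated objective: alternative
-- what changed: Replaces the single stateful pass with branch dispatch by flattening the samples once and computing each color's maximum (with 0 as a candidate) in its own filtered scan.
import Mathlib
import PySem

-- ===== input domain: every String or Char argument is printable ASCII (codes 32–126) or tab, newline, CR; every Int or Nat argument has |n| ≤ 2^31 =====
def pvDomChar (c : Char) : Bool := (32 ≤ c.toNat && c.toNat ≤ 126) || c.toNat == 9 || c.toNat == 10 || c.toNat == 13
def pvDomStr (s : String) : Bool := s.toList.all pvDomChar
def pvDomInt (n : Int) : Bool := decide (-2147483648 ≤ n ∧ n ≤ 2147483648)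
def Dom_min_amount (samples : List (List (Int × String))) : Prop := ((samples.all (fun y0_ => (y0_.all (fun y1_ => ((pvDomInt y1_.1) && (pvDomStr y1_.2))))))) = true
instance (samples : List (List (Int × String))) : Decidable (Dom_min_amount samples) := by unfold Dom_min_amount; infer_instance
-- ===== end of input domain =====

-- B flattens the samples once and takes each color's maximum (with 0 included) in its own filtered scan,
-- replacing A's single stateful pass with branch dispatch; objective: alternative decomposition.

-- ===== PORT A =====
-- one inner-loop step of A: updates the (red, green, blue) state for one (amount, color) pair
def pvStepA (st : Int × Int × Int) (p : Int × String) : Int × Int × Int :=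
  if p.2 = "red" ∧ st.1 < p.1 then (p.1, st.2.1, st.2.2)
  else if p.2 = "green" ∧ st.2.1 < p.1 then (st.1, p.1, st.2.2)
  else if p.2 = "blue" ∧ st.2.2 < p.1 then (st.1, st.2.1, p.1)
  else st

def min_amount (samples : List (List (Int × String))) : Int × Int × Int :=
  samples.foldl (fun st sample => sample.foldl pvStepA st) (0, 0, 0)

-- ===== PORT B =====
-- max([0] + [amount for amount, color in flat if color == target])
def pvBestB (flat : List (Int × String)) (target : String) : Int :=
  (((flat.filter (fun p => p.2 = target)).map (fun p => p.1))).foldl max 0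

def min_amount_alt (samples : List (List (Int × String))) : Int × Int × Int :=
  let flat := samples.flatMap (fun sample => sample)
  (pvBestB flat "red", pvBestB flat "green", pvBestB flat "blue")

-- ===== PRECONDITION & SPEC =====
def Spec_min_amount (samples : List (List (Int × String))) (out : Int × Int × Int) : Prop := out = min_amount_alt samples
instance (samples : List (List (Int × String))) (out : Int × Int × Int) : Decidable (Spec_min_amount samples out) := by unfold Spec_min_amount; infer_instance

-- ===== CLAIM (what is proved, stated in full; the proofs are below) =====
def Claim_equal_min_amount : Prop := ∀ (samples : List (List (Int × String))), Dom_min_amount samples → Spec_min_amount samples (min_amount samples)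

-- ===== LEMMAS AND PROOFS =====

-- one inner pass of A over a flat list, from an arbitrary state, is the three filtered maxima
theorem pvStepA_fold (l : List (Int × String)) (r g b : Int) :
    l.foldl pvStepA (r, g, b) =
      (((l.filter (fun p => p.2 = "red")).map (fun p => p.1)).foldl max r,
       ((l.filter (fun p => p.2 = "green")).map (fun p => p.1)).foldl max g,
       ((l.filter (fun p => p.2 = "blue")).map (fun p => p.1)).foldl max b) := by
  induction l generalizing r g b with
  | nil => simp
  | cons p t ih =>
    obtain ⟨a, c⟩ := p
    by_cases hr : c = "red"
    · subst hr
      rcases lt_or_ge r a with h | h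
      · simp [List.foldl_cons, pvStepA, h, ih, max_eq_right h.le]
      · simp [List.foldl_cons, pvStepA, not_lt.mpr h, ih, max_eq_left h]
    · by_cases hg : c = "green"
      · subst hg
        rcases lt_or_ge g a with h | h
        · simp [List.foldl_cons, pvStepA, h, ih, max_eq_right h.le]
        · simp [List.foldl_cons, pvStepA, not_lt.mpr h, ih, max_eq_left h]
      · by_cases hb : c = "blue"
        · subst hb
          rcases lt_or_ge b a with h | h
          · simp [List.foldl_cons, pvStepA, h, ih, max_eq_right h.le]
          · simp [List.foldl_cons, pvStepA, not_lt.mpr h, ih, max_eq_left h]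
        · simp only [List.foldl_cons, pvStepA, List.filter_cons]
          simp_all

-- A's nested fold over samples equals one fold over the flattened list
theorem pvFold_flat (samples : List (List (Int × String))) (st : Int × Int × Int) :
    samples.foldl (fun st sample => sample.foldl pvStepA st) st =
      (samples.flatMap (fun sample => sample)).foldl pvStepA st := by
  induction samples generalizing st with
  | nil => simp
  | cons h t ih => simp [List.foldl_append, ih]

-- ===== VERDICT (by name: the statement is the Claim_ definition above) =====
theorem min_amount_spec : Claim_equal_min_amount := by
  intro samples _
  unfold Spec_min_amount min_amount min_amount_alt pvBestB
  rw [pvFold_flat, pvStepA_fold]
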